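-- pv_equiv track=rewrite | github.com/ArushC/ciphers | cryptanalysis/cipherStats.py | rod_and_lr_helper
-- ===== SOURCE A (Python) =====
-- def rod_and_lr_helper(msg):
--     #for every character c in the message
--     #for every character d to the right of c
--     #n = # of characters for which strings starting at c and d are identical
--     #if n > 1, sum_all += 1
--     #   if c & d are also an odd number of characters apart, increment sum_odd
--     #if n = 3, increment r3
--     r3 = 0
--     sum_all = 0
--     sum_odd = 0
--     for index in range(len(msg)): #for every c in the message
--         start_c_index = index
--         for start_d_index in range(index + 1, len(msg), 1):
--             n = 0
--             try:
--                 while msg[start_c_index + n] == msg[start_d_index + n]: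
--                     n += 1
--             except IndexError:
--                 pass
--             if n > 1:
--                 if n == 3:
--                     r3 += 1
--                 if (start_d_index - start_c_index)  % 2 == 1:
--                     sum_odd += 1
--
--                 sum_all += 1
--
--     return r3, sum_odd, sum_all
-- ===== SOURCE B (Python) =====
-- def rod_and_lr_helper(msg):
--     # Per-shift dynamic programming: for each distance d, compute the match
--     # length lcp(i, i+d) right-to-left in O(1) from lcp(i+1, i+1+d).
--     n = len(msg)
--     r3 = 0
--     sum_odd = 0
--     sum_all = 0
--     for d in range(1, n):
--         run = 0
--         for i in range(n - d - 1, -1, -1):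
--             run = run + 1 if msg[i] == msg[i + d] else 0
--             if run > 1:
--                 sum_all += 1
--                 if run == 3:
--                     r3 += 1
--                 if d % 2 == 1:
--                     sum_odd += 1
--     return r3, sum_odd, sum_all
-- ===== Notes on version B (the rewrite author's own statement) =====
-- stated objective: faster
-- what changed: Instead of rescanning characters pairwise for every (i,j) pair, B iterates over distances d and computes the common-prefix length lcp(i,i+d) right-to-left in O(1) per position from lcp(i+1,i+1+d), turning the per-pair scan into a per-distance dynamic programming.
import Mathlib
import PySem

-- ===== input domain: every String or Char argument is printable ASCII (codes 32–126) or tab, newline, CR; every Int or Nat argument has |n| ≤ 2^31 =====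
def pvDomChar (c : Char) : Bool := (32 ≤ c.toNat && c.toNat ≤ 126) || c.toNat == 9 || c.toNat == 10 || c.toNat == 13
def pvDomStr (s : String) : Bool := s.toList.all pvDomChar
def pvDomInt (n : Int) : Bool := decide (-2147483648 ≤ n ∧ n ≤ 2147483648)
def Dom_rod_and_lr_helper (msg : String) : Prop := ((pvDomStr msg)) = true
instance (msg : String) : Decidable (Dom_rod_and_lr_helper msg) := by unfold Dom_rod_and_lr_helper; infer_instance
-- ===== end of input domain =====

-- B replaces A's per-pair character-by-character rescans by a per-distance
-- right-to-left dynamic programming on match-run lengths (objective: faster, O(n^2) vs O(n^3)).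

-- ===== PORT A =====
-- the 'while msg[c+n] == msg[d+n]: n += 1' loop; IndexError (either index out of range) stops it
def whileN (l : List Char) (ci di n : Nat) : Nat :=
  if h : ci + n < l.length ∧ di + n < l.length then
    if l[ci + n]'h.1 = l[di + n]'h.2 then whileN l ci di (n + 1) else n
  else n
termination_by l.length - n
decreasing_by omega

-- body of A's inner 'for start_d_index in range(index+1, len(msg), 1)' loop
def pairStep (l : List Char) (index : Nat) (acc : Int × Int × Int) (j : Nat) : Int × Int × Int :=
  let n := whileN l index j 0
  if n > 1 then
    let acc := if n = 3 then (acc.1 + 1, acc.2.1, acc.2.2) else acc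
    let acc := if (j - index) % 2 = 1 then (acc.1, acc.2.1 + 1, acc.2.2) else acc
    (acc.1, acc.2.1, acc.2.2 + 1)
  else acc

def rod_and_lr_helper (msg : String) : Int × Int × Int :=
  let l := msg.toList
  (List.range l.length).foldl
    (fun acc index => (List.range' (index + 1) (l.length - (index + 1))).foldl (pairStep l index) acc)
    (0, 0, 0)

-- ===== PORT B =====
-- body of B's inner 'for i in range(n - d - 1, -1, -1)' loop; state = (run, (r3, sum_odd, sum_all))
def runStep (l : List Char) (d : Nat) (st : Nat × (Int × Int × Int)) (i : Nat) : Nat × (Int × Int × Int) :=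
  let run := if l[i]! = l[i + d]! then st.1 + 1 else 0
  let acc := st.2
  let acc :=
    if run > 1 then
      let acc := (acc.1, acc.2.1, acc.2.2 + 1)
      let acc := if run = 3 then (acc.1 + 1, acc.2.1, acc.2.2) else acc
      if d % 2 = 1 then (acc.1, acc.2.1 + 1, acc.2.2) else acc
    else acc
  (run, acc)

def rod_and_lr_helper_alt (msg : String) : Int × Int × Int :=
  let l := msg.toList
  let n := l.length
  (List.range' 1 (n - 1)).foldl
    (fun acc d => ((List.range (n - d)).reverse.foldl (runStep l d) (0, acc)).2)
    (0, 0, 0)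

-- ===== PRECONDITION & SPEC =====
def Spec_rod_and_lr_helper (msg : String) (out : Int × Int × Int) : Prop := out = rod_and_lr_helper_alt msg
instance (msg : String) (out : Int × Int × Int) : Decidable (Spec_rod_and_lr_helper msg out) := by unfold Spec_rod_and_lr_helper; infer_instance

-- ===== CLAIM (what is proved, stated in full; the proofs are below) =====
def Claim_equal_rod_and_lr_helper : Prop := ∀ (msg : String), Dom_rod_and_lr_helper msg → Spec_rod_and_lr_helper msg (rod_and_lr_helper msg)

-- ===== LEMMAS AND PROOFS =====

-- per-pair contribution to (r3, sum_odd, sum_all)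
def contrib (m d : Nat) : Int × Int × Int :=
  ((if m = 3 then 1 else 0), (if 1 < m ∧ d % 2 = 1 then 1 else 0), (if 1 < m then 1 else 0))

lemma whileN_stop (l : List Char) (ci di : Nat) (h : ¬ (ci < l.length ∧ di < l.length)) :
    whileN l ci di 0 = 0 := by
  rw [whileN]; simp [h]

lemma whileN_shift (l : List Char) : ∀ fuel ci di n, l.length - n ≤ fuel →
    whileN l ci di (n + 1) = whileN l (ci + 1) (di + 1) n + 1 := by
  intro fuel
  induction fuel with
  | zero =>
    intro ci di n hf
    conv_lhs => rw [whileN]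
    conv_rhs => rw [whileN]
    have h1 : ¬ (ci + (n + 1) < l.length ∧ di + (n + 1) < l.length) := by omega
    have h2 : ¬ (ci + 1 + n < l.length ∧ di + 1 + n < l.length) := by omega
    rw [dif_neg h1, dif_neg h2]
  | succ fuel ih =>
    intro ci di n hf
    conv_lhs => rw [whileN]
    conv_rhs => rw [whileN]
    have e1 : ci + (n + 1) = ci + 1 + n := by omega
    have e2 : di + (n + 1) = di + 1 + n := by omega
    by_cases h : ci + 1 + n < l.length ∧ di + 1 + n < l.length
    · have h' : ci + (n + 1) < l.length ∧ di + (n + 1) < l.length := by omega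
      rw [dif_pos h', dif_pos h]
      simp only [e1, e2]
      split
      · exact ih ci di (n + 1) (by omega)
      · rfl
    · have h' : ¬ (ci + (n + 1) < l.length ∧ di + (n + 1) < l.length) := by omega
      rw [dif_neg h', dif_neg h]

lemma whileN_rec (l : List Char) (ci di : Nat) (hci : ci < l.length) (hdi : di < l.length) :
    whileN l ci di 0 = if l[ci] = l[di] then whileN l (ci + 1) (di + 1) 0 + 1 else 0 := by
  conv_lhs => rw [whileN]
  have h : ci + 0 < l.length ∧ di + 0 < l.length := by omega
  simp only [h, and_self, dif_pos]
  have hg : l[ci + 0]'h.1 = l[ci] := by congr 1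
  have hg2 : l[di + 0]'h.2 = l[di] := by congr 1
  rw [hg, hg2]
  split
  · rw [whileN_shift l (l.length) ci di 0 (by omega)]
  · rfl

lemma pairStep_eq (l : List Char) (index : Nat) (acc : Int × Int × Int) (j : Nat) :
    pairStep l index acc j = acc + contrib (whileN l index j 0) (j - index) := by
  obtain ⟨a, b, c⟩ := acc
  simp only [pairStep, contrib, Prod.mk_add_mk]
  split_ifs <;> simp_all

lemma runStep_eq (l : List Char) (d : Nat) (r : Nat) (acc : Int × Int × Int) (i : Nat) :
    runStep l d (r, acc) i =
      ((if l[i]! = l[i + d]! then r + 1 else 0),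
        acc + contrib (if l[i]! = l[i + d]! then r + 1 else 0) d) := by
  obtain ⟨a, b, c⟩ := acc
  simp only [runStep, contrib, Prod.mk_add_mk]
  split_ifs <;> simp_all

lemma foldl_fun_congr {α β : Type} (f g : β → α → β) (l : List α) (a : β)
    (h : ∀ b x, f b x = g b x) : l.foldl f a = l.foldl g a := by
  induction l generalizing a with
  | nil => rfl
  | cons x xs ih => simp only [List.foldl_cons, h]; exact ih _

lemma foldl_add_eq {α M : Type} [AddCommMonoid M] (f : α → M) (l : List α) :
    ∀ a : M, l.foldl (fun acc x => acc + f x) a = a + (l.map f).sum := by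
  induction l with
  | nil => intro a; simp
  | cons x xs ih => intro a; simp [ih, add_assoc]

lemma sum_range_list {M : Type} [AddCommMonoid M] (f : Nat → M) :
    ∀ n, ((List.range n).map f).sum = ∑ i ∈ Finset.range n, f i := by
  intro n
  induction n with
  | zero => simp
  | succ n ih => simp [List.range_succ, Finset.sum_range_succ, ih]

-- B's inner loop invariant: incoming run = lcp value at position k
lemma innerB_inv (l : List Char) (d : Nat) (hd : 0 < d) :
    ∀ k (acc : Int × Int × Int), k + d ≤ l.length →
    ((List.range k).reverse.foldl (runStep l d) (whileN l k (k + d) 0, acc)).2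
      = acc + ((List.range k).map (fun i => contrib (whileN l i (i + d) 0) d)).sum := by
  intro k
  induction k with
  | zero => intro acc h; simp
  | succ k ih =>
    intro acc h
    have hk : k < l.length := by omega
    have hkd : k + d < l.length := by omega
    rw [List.range_succ, List.reverse_append]
    simp only [List.reverse_singleton, List.singleton_append, List.foldl_cons]
    rw [runStep_eq]
    have hg : l[k]! = l[k] := getElem!_pos l k hk
    have hg2 : l[k + d]! = l[k + d] := getElem!_pos l (k + d) hkd
    have hrec : (if l[k]! = l[k + d]! then whileN l (k + 1) (k + 1 + d) 0 + 1 else 0)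
        = whileN l k (k + d) 0 := by
      rw [hg, hg2, whileN_rec l k (k + d) hk hkd]
      have : k + 1 + d = k + d + 1 := by omega
      rw [this]
    have harg : k + 1 + d = k + 1 + d := rfl
    rw [show whileN l (k + 1) (k + 1 + d) 0 = whileN l (k + 1) ((k + 1) + d) 0 from rfl] at hrec
    rw [hrec]
    rw [ih (acc + contrib (whileN l k (k + d) 0) d) (by omega)]
    simp only [List.map_append, List.map_cons, List.map_nil, List.sum_append, List.sum_cons,
      List.sum_nil, add_zero]
    abel

-- A's value as a double sum
lemma A_eq_sum (l : List Char) :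
    (List.range l.length).foldl
      (fun acc index => (List.range' (index + 1) (l.length - (index + 1))).foldl (pairStep l index) acc)
      (0, 0, 0)
    = ∑ i ∈ Finset.range l.length, ∑ t ∈ Finset.range (l.length - (i + 1)),
        contrib (whileN l i (i + 1 + t) 0) (t + 1) := by
  rw [foldl_fun_congr _ (fun acc index =>
      acc + ((List.range' (index + 1) (l.length - (index + 1))).map
        (fun j => contrib (whileN l index j 0) (j - index))).sum) _ _ ?_]
  · rw [foldl_add_eq, sum_range_list]
    rw [show ((0, 0, 0) : Int × Int × Int) = 0 from rfl, zero_add]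
    refine Finset.sum_congr rfl ?_
    intro i _
    rw [List.range'_eq_map_range]
    rw [List.map_map, sum_range_list]
    refine Finset.sum_congr rfl ?_
    intro t _
    simp only [Function.comp]
    have e1 : i + 1 + t - i = t + 1 := by omega
    rw [e1]
  · intro b x
    rw [foldl_fun_congr _ (fun acc j => acc + contrib (whileN l x j 0) (j - x)) _ _
      (fun b' j => pairStep_eq l x b' j)]
    rw [foldl_add_eq]

-- B's value as a double sum
lemma B_eq_sum (l : List Char) :
    (List.range' 1 (l.length - 1)).foldl
      (fun acc d => ((List.range (l.length - d)).reverse.foldl (runStep l d) (0, acc)).2)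
      (0, 0, 0)
    = ∑ e ∈ Finset.range (l.length - 1), ∑ i ∈ Finset.range (l.length - (e + 1)),
        contrib (whileN l i (i + (e + 1)) 0) (e + 1) := by
  rw [PySem.List.foldl_congr_mem _ _ (fun acc d =>
      acc + ((List.range (l.length - d)).map (fun i => contrib (whileN l i (i + d) 0) d)).sum) _ ?_]
  · rw [foldl_add_eq, List.range'_eq_map_range, List.map_map, sum_range_list,
      show ((0, 0, 0) : Int × Int × Int) = 0 from rfl, zero_add]
    refine Finset.sum_congr rfl ?_
    intro e _
    simp only [Function.comp]
    rw [sum_range_list]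
    have : 1 + e = e + 1 := by omega
    rw [this]
  · intro b d hd
    have hd' : 1 ≤ d ∧ d < 1 + (l.length - 1) := List.mem_range'_1.mp hd
    have h0 : whileN l (l.length - d) ((l.length - d) + d) 0 = 0 := by
      apply whileN_stop
      omega
    have := innerB_inv l d (by omega) (l.length - d) b (by omega)
    rw [h0] at this
    exact this

-- triangular double-sum swap
lemma tri_swap {M : Type} [AddCommMonoid M] (n : Nat) (G : Nat → Nat → M) :
    ∑ i ∈ Finset.range n, ∑ t ∈ Finset.range (n - (i + 1)), G i t
      = ∑ t ∈ Finset.range (n - 1), ∑ i ∈ Finset.range (n - (t + 1)), G i t := by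
  rw [Finset.sum_sigma' (Finset.range n) (fun i => Finset.range (n - (i + 1))) (fun i t => G i t),
      Finset.sum_sigma' (Finset.range (n - 1)) (fun t => Finset.range (n - (t + 1))) (fun t i => G i t)]
  refine Finset.sum_nbij' (fun p => ⟨p.2, p.1⟩) (fun p => ⟨p.2, p.1⟩) ?_ ?_ ?_ ?_ ?_
  · intro p hp
    simp only [Finset.mem_sigma, Finset.mem_range] at *
    omega
  · intro p hp
    simp only [Finset.mem_sigma, Finset.mem_range] at *
    omega
  · intro p _; rfl
  · intro p _; rfl
  · intro p _; rfl

-- ===== VERDICT (by name: the statement is the Claim_ definition above) =====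
theorem rod_and_lr_helper_spec : Claim_equal_rod_and_lr_helper := by
  intro msg _
  unfold Spec_rod_and_lr_helper rod_and_lr_helper rod_and_lr_helper_alt
  rw [A_eq_sum, B_eq_sum, tri_swap]
  refine Finset.sum_congr rfl fun t _ => Finset.sum_congr rfl fun i _ => ?_
  rw [show i + 1 + t = i + (t + 1) from by omega]
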